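-- pv_equiv track=rewrite | github.com/TheoHorn/advent-of-code | 2023/14/golden_star.py | update_south
-- ===== SOURCE A (Python) =====
-- def update_south(column):
--     last_block = len(column)
--     for j in range(len(column)-1, -1, -1):
--         if column[j] == '#':
--             last_block = j
--         if column[j] == 'O':
--             if j < last_block-1:
--                 column = column[:j] + '.' + column[j + 1:]
--                 column = column[:last_block-1] + 'O' + column[last_block:]
--                 last_block -=1
--             else:
--                 last_block = j
--     return column
-- ===== SOURCE B (Python) =====
-- def update_south(column):
--     # One pass: within each '#'-bounded segment, rocks settle at the segment's end;
--     # each surviving prefix char keeps its place ('O' origins become '.').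
--     parts = []
--     seg = []
--     rocks = 0
--     for c in column:
--         if c == '#':
--             parts.append(''.join(seg[:len(seg) - rocks]) + 'O' * rocks + '#')
--             seg = []
--             rocks = 0
--         elif c == 'O':
--             seg.append('.')
--             rocks += 1
--         else:
--             seg.append(c)
--     parts.append(''.join(seg[:len(seg) - rocks]) + 'O' * rocks)
--     return ''.join(parts)
-- ===== Notes on version B (the rewrite author's own statement) =====
-- stated objective: alternative
-- what changed: A scans from the right and moves each rock one at a time by rebuilding the whole string with slicing while tracking the last blocking index; B makes one left-to-right pass that buffers each '#'-bounded segment, replaces rock origins by '.', counts rocks, and emits the buffered prefix followed by the stacked rocks at each wall and at the end.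
import Mathlib
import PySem

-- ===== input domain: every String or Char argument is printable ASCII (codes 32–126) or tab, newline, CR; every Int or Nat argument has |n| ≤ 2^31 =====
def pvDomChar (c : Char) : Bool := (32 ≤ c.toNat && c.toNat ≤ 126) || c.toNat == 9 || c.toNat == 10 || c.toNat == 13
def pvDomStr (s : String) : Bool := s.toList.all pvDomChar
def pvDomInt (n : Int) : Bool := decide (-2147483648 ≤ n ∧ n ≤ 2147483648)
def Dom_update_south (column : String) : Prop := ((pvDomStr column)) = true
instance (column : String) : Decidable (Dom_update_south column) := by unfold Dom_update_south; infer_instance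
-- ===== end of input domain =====

-- B replaces A's right-to-left move-one-rock-at-a-time slicing loop by a single left-to-right
-- pass that counts the rocks of each '#'-bounded segment and emits them stacked at the segment's end.

-- ===== PORT A =====
-- the loop 'for j in range(len(column)-1, -1, -1)' as the obvious countdown recursion;
-- state = (column, last_block); column[j] with 0 ≤ j < len is exact as getD.
def update_south_go : Nat → List Char × Int → List Char × Int
  | 0, st => st
  | j + 1, (column, last_block) =>
      let c := column.getD j ' '                        -- column[j], j always in range here
      let last_block := if c = '#' then (j : Int) else last_block
      let st :=
        if c = 'O' then
          if (j : Int) < last_block - 1 then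
            -- column = column[:j] + '.' + column[j+1:]
            let column := PySem.List.slice column none (some (j : Int)) ++ '.' ::
                          PySem.List.slice column (some ((j : Int) + 1)) none
            -- column = column[:last_block-1] + 'O' + column[last_block:]
            let column := PySem.List.slice column none (some (last_block - 1)) ++ 'O' ::
                          PySem.List.slice column (some last_block) none
            (column, last_block - 1)
          else (column, (j : Int))
        else (column, last_block)
      update_south_go j st

def update_south (column : String) : String :=
  String.mk (update_south_go column.toList.length
    (column.toList, (column.toList.length : Int))).1

-- ===== PORT B =====
-- one pass; state = (parts, seg, rocks): seg[:len(seg)-rocks] is List.take, 'O'*rocks is List.replicate,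
-- the final ''.join of the collected parts is List.flatten.
-- loop body: state = (parts, seg, rocks)
def altStep (st : List (List Char) × List Char × Nat) (c : Char) :
    List (List Char) × List Char × Nat :=
  if c = '#' then
    (st.1 ++ [st.2.1.take (st.2.1.length - st.2.2) ++ List.replicate st.2.2 'O' ++ ['#']],
     ([] : List Char), 0)
  else if c = 'O' then
    (st.1, st.2.1 ++ ['.'], st.2.2 + 1)
  else
    (st.1, st.2.1 ++ [c], st.2.2)

-- after the loop: flush the open segment and join the parts
def altFinish (st : List (List Char) × List Char × Nat) : List Char :=
  (st.1 ++ [st.2.1.take (st.2.1.length - st.2.2) ++ List.replicate st.2.2 'O']).flatten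

def update_south_alt (column : String) : String :=
  String.mk (altFinish (column.toList.foldl altStep ([], [], 0)))

-- ===== PRECONDITION & SPEC =====
def Spec_update_south (column : String) (out : String) : Prop := out = update_south_alt column
instance (column : String) (out : String) : Decidable (Spec_update_south column out) := by unfold Spec_update_south; infer_instance

-- ===== CLAIM (what is proved, stated in full; the proofs are below) =====
def Claim_equal_update_south : Prop := ∀ (column : String), Dom_update_south column → Spec_update_south column (update_south column)

-- ===== LEMMAS AND PROOFS =====

-- the settled column, defined by head recursion: a rock sinks into the slack
-- (= free slots before the next wall) of the already-settled tail.
def settle : List Char → List Char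
  | [] => []
  | c :: s =>
    if c = 'O' then
      let slack := (s.takeWhile (· ≠ '#')).length - (s.takeWhile (· ≠ '#')).count 'O'
      if slack = 0 then 'O' :: settle s else '.' :: (settle s).set (slack - 1) 'O'
    else c :: settle s

-- accumulator form of B's pass (parts inlined)
def prep : List Char → List Char → Nat → List Char
  | [], seg, rocks => seg.take (seg.length - rocks) ++ List.replicate rocks 'O'
  | c :: s, seg, rocks =>
    if c = '#' then
      seg.take (seg.length - rocks) ++ List.replicate rocks 'O' ++ '#' :: prep s [] 0
    else if c = 'O' then
      prep s (seg ++ ['.']) (rocks + 1)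
    else
      prep s (seg ++ [c]) rocks

def mapped (p : List Char) : List Char := p.map (fun c => if c = 'O' then '.' else c)

theorem settle_length (s : List Char) : (settle s).length = s.length := by
  induction s with
  | nil => simp [settle]
  | cons c s ih => simp only [settle]; split_ifs <;> simp [ih]

theorem takeWhile_of_not_mem {p : List Char} (h : '#' ∉ p) : p.takeWhile (· ≠ '#') = p := by
  rw [List.takeWhile_eq_self_iff]
  intro c hc
  simp only [decide_eq_true_eq]
  rintro rfl
  exact h hc

theorem mapped_length (p : List Char) : (mapped p).length = p.length := by
  simp [mapped]

theorem settle_no_wall {p : List Char} (h : '#' ∉ p) :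
    settle p = (mapped p).take (p.length - p.count 'O') ++ List.replicate (p.count 'O') 'O' := by
  induction p with
  | nil => simp [settle, mapped]
  | cons c p ih =>
    have hp : '#' ∉ p := fun hc => h (List.mem_cons_of_mem _ hc)
    have hk : p.count 'O' ≤ p.length := List.count_le_length
    have hml := mapped_length p
    simp only [settle, takeWhile_of_not_mem hp]
    by_cases hc : c = 'O'
    · subst hc
      by_cases hz : p.length - p.count 'O' = 0
      · simp only [if_pos rfl, hz, ih hp]
        have hq : p.length = p.count 'O' := by omega
        simp [mapped, List.count_cons, hq, List.replicate_succ]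
      · simp only [if_pos rfl, if_neg hz, ih hp]
        have hlt : p.length - p.count 'O' - 1 < ((mapped p).take (p.length - p.count 'O')).length := by
          rw [List.length_take]; omega
        rw [List.set_append_left _ _ hlt, List.set_eq_take_cons_drop _ hlt]
        simp only [List.take_take, List.drop_take]
        have h1 : min (p.length - p.count 'O' - 1) (p.length - p.count 'O') = p.length - p.count 'O' - 1 := by omega
        have h2 : p.length - p.count 'O' - (p.length - p.count 'O' - 1 + 1) = 0 := by omega
        rw [h1, h2]
        have h3 : ('O' :: p).length - ('O' :: p).count 'O' = (p.length - p.count 'O' - 1) + 1 := by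
          simp [List.count_cons]; omega
        have h4 : ('O' :: p).count 'O' = p.count 'O' + 1 := by simp [List.count_cons]
        have h5 : mapped ('O' :: p) = '.' :: mapped p := by simp [mapped]
        rw [h3, h4, h5, List.take_succ_cons]
        simp [List.replicate_succ]
    · have hcn : (if c = 'O' then '.' else c) = c := if_neg hc
      simp only [if_neg hc, ih hp]
      have h3 : (c :: p).length - (c :: p).count 'O' = (p.length - p.count 'O') + 1 := by
        simp [List.count_cons, hc]; omega
      have h4 : (c :: p).count 'O' = p.count 'O' := by simp [List.count_cons, hc]
      rw [h3, h4]
      simp [mapped, hcn]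

def slackOf (s : List Char) : Nat :=
  (s.takeWhile (· ≠ '#')).length - (s.takeWhile (· ≠ '#')).count 'O'

theorem takeWhile_wall {p : List Char} (s : List Char) (h : '#' ∉ p) :
    (p ++ '#' :: s).takeWhile (· ≠ '#') = p := by
  induction p with
  | nil => simp [List.takeWhile_cons]
  | cons c p ih =>
    have hc : c ≠ '#' := fun hc => h (hc ▸ List.mem_cons_self)
    have hp : '#' ∉ p := fun hm => h (List.mem_cons_of_mem _ hm)
    simp only [List.cons_append, List.takeWhile_cons]
    simp [hc]
    simpa using ih hp

theorem count_takeWhile_le (s : List Char) :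
    (s.takeWhile (· ≠ '#')).count 'O' ≤ (s.takeWhile (· ≠ '#')).length :=
  List.count_le_length

theorem slack_le (s : List Char) : slackOf s ≤ s.length := by
  have := (List.takeWhile_sublist (p := fun x => decide (x ≠ '#')) (l := s)).length_le
  unfold slackOf; omega

theorem slack_wall (s : List Char) : slackOf ('#' :: s) = 0 := by
  simp [slackOf, List.takeWhile_cons]

theorem slack_O (s : List Char) : slackOf ('O' :: s) = slackOf s := by
  have ht : ('O' :: s).takeWhile (· ≠ '#') = 'O' :: s.takeWhile (· ≠ '#') := by
    simp [List.takeWhile_cons]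
  unfold slackOf
  rw [ht, List.length_cons, List.count_cons]
  simp

theorem slack_other {c : Char} (s : List Char) (h1 : c ≠ '#') (h2 : c ≠ 'O') :
    slackOf (c :: s) = slackOf s + 1 := by
  have ht : (c :: s).takeWhile (· ≠ '#') = c :: s.takeWhile (· ≠ '#') := by
    simp [List.takeWhile_cons, h1]
  have hco : (c == 'O') = false := by simp [h2]
  have := count_takeWhile_le s
  unfold slackOf
  rw [ht, List.length_cons, List.count_cons, hco]
  simp only [Bool.false_eq_true, if_false, Nat.add_zero]
  omega

theorem settle_wall (s : List Char) : settle ('#' :: s) = '#' :: settle s := by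
  simp [settle]

theorem settle_other {c : Char} (s : List Char) (h : c ≠ 'O') :
    settle (c :: s) = c :: settle s := by
  simp [settle, h]

theorem settle_O (s : List Char) :
    settle ('O' :: s) =
      if slackOf s = 0 then 'O' :: settle s
      else '.' :: (settle s).set (slackOf s - 1) 'O' := by
  simp [settle, slackOf]

theorem settle_append_wall {p : List Char} (s : List Char) (h : '#' ∉ p) :
    settle (p ++ '#' :: s) = settle p ++ '#' :: settle s := by
  induction p with
  | nil => simp [settle_wall, settle]
  | cons c p ih =>
    have hp : '#' ∉ p := fun hc => h (List.mem_cons_of_mem _ hc)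
    have hk := count_takeWhile_le p
    rw [List.cons_append]
    by_cases hc : c = 'O'
    · subst hc
      rw [settle_O, settle_O]
      have hs1 : slackOf (p ++ '#' :: s) = slackOf p := by
        unfold slackOf
        rw [takeWhile_wall s hp, takeWhile_of_not_mem hp]
      rw [hs1]
      by_cases hz : slackOf p = 0
      · simp [hz, ih hp]
      · simp only [if_neg hz, ih hp]
        have hlen : slackOf p - 1 < (settle p).length := by
          have h1 := slack_le p
          rw [settle_length]; omega
        rw [List.cons_append, List.set_append_left _ _ hlen]
    · rw [settle_other _ hc, settle_other _ hc, ih hp, List.cons_append]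

theorem prep_eq_settle (s : List Char) : ∀ p : List Char, '#' ∉ p →
    prep s (mapped p) (p.count 'O') = settle (p ++ s) := by
  induction s with
  | nil =>
    intro p hp
    rw [prep, List.append_nil, settle_no_wall hp, mapped_length]
  | cons c s ih =>
    intro p hp
    by_cases hw : c = '#'
    · subst hw
      rw [prep, if_pos rfl, settle_append_wall s hp, settle_no_wall hp, mapped_length]
      have h0 : prep s ([] : List Char) 0 = settle s := by
        have := ih [] (by simp)
        simpa [mapped] using this
      rw [h0, List.append_assoc]
    · by_cases hO : c = 'O'
      · subst hO
        rw [prep, if_neg (by decide), if_pos rfl]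
        have hm : mapped p ++ ['.'] = mapped (p ++ ['O']) := by simp [mapped]
        have hcnt : p.count 'O' + 1 = (p ++ ['O']).count 'O' := by
          simp [List.count_append]
        have hp' : '#' ∉ p ++ ['O'] := by
          intro hm'; rcases List.mem_append.1 hm' with h1 | h1
          · exact hp h1
          · simp at h1
        rw [hm, hcnt, ih _ hp']
        simp
      · rw [prep, if_neg hw, if_neg hO]
        have hm : mapped p ++ [c] = mapped (p ++ [c]) := by simp [mapped, hO]
        have hcnt : p.count 'O' = (p ++ [c]).count 'O' := by
          simp [List.count_append, List.count_singleton, hO]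
        have hp' : '#' ∉ p ++ [c] := by
          intro hm'; rcases List.mem_append.1 hm' with h1 | h1
          · exact hp h1
          · simp at h1; exact hw h1.symm
        rw [hm, hcnt, ih _ hp']
        simp

-- B's fold with the parts accumulator equals prep
theorem foldB (s : List Char) : ∀ (parts : List (List Char)) (seg : List Char) (rocks : Nat),
    altFinish (s.foldl altStep (parts, seg, rocks)) = parts.flatten ++ prep s seg rocks := by
  induction s with
  | nil => intro parts seg rocks; simp [altFinish, prep]
  | cons c s ih =>
    intro parts seg rocks
    by_cases hw : c = '#'
    · subst hw
      rw [List.foldl_cons, altStep, if_pos rfl, ih]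
      simp [prep]
    · by_cases hO : c = 'O'
      · subst hO
        rw [List.foldl_cons, altStep, if_neg (by decide : ¬(('O' : Char) = '#')), if_pos rfl, ih]
        simp [prep]
      · rw [List.foldl_cons, altStep, if_neg hw, if_neg hO, ih]
        simp [prep, hw, hO]

theorem alt_eq_settle (column : String) :
    update_south_alt column = String.mk (settle column.toList) := by
  unfold update_south_alt
  rw [foldB column.toList [] [] 0]
  have := prep_eq_settle column.toList [] (by simp)
  simp only [mapped, List.map_nil, List.count_nil] at this
  rw [this]
  simp

-- the A-loop invariant: after the indices > j are processed, the prefix up to j is untouched,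
-- the suffix is settled, and last_block = j + slack of the suffix
theorem goA_inv (cs0 : List Char) (j : Nat) (hj : j ≤ cs0.length) :
    update_south_go j
      (cs0.take j ++ settle (cs0.drop j), (j : Int) + (slackOf (cs0.drop j) : Int))
    = (settle cs0, (slackOf cs0 : Int)) := by
  induction j with
  | zero => simp [update_south_go]
  | succ j ih =>
    have hjlen : j < cs0.length := by omega
    have hlen1 : (cs0.take (j + 1)).length = j + 1 := by
      rw [List.length_take]; omega
    set s' := cs0.drop (j + 1) with hs'
    have hdrop : cs0.drop j = cs0[j] :: s' := List.drop_eq_getElem_cons hjlen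
    have htake : cs0.take (j + 1) = cs0.take j ++ [cs0[j]] := by
      rw [List.take_succ]; simp [List.getElem?_eq_getElem hjlen]
    have hc : (cs0.take (j + 1) ++ settle s').getD j ' ' = cs0[j] := by
      simp only [List.getD]
      rw [List.getElem?_append_left (by omega)]
      rw [List.getElem?_take_of_lt (by omega), List.getElem?_eq_getElem hjlen]
      rfl
    rw [update_south_go]
    simp only [hc]
    by_cases hw : cs0[j] = '#'
    · rw [if_pos hw, if_neg (by rw [hw]; decide)]
      have : cs0.take j ++ settle (cs0.drop j) = cs0.take (j + 1) ++ settle s' := by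
        rw [hdrop, hw, settle_wall, htake, hw]
        simp
      rw [← this] at *
      have hslack : slackOf (cs0.drop j) = 0 := by rw [hdrop, hw, slack_wall]
      have := ih (by omega)
      rw [hslack] at this
      simpa using this
    · rw [if_neg hw]
      by_cases hO : cs0[j] = 'O'
      · rw [if_pos hO]
        have hsO : slackOf (cs0.drop j) = slackOf s' := by rw [hdrop, hO, slack_O]
        by_cases hz : slackOf s' = 0
        · rw [if_neg (by push_cast; omega)]
          have hstate : cs0.take j ++ settle (cs0.drop j) = cs0.take (j + 1) ++ settle s' := by
            rw [hdrop, hO, settle_O, if_pos hz, htake, hO]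
            simp
          have := ih (by omega)
          rw [hstate, hsO, hz] at this
          simpa using this
        · rw [if_pos (by push_cast; omega)]
          -- first rebuild: column[:j] + '.' + column[j+1:]
          have e1 : PySem.List.slice (cs0.take (j + 1) ++ settle s') none (some (j : Int))
              = cs0.take j := by
            rw [PySem.List.slice_to_natCast, List.take_append_of_le_length (by omega),
                List.take_take]
            simp
          have e2 : PySem.List.slice (cs0.take (j + 1) ++ settle s') (some ((j : Int) + 1)) none
              = settle s' := by
            have : ((j : Int) + 1) = ((j + 1 : Nat) : Int) := by push_cast; ring
            rw [this, PySem.List.slice_from_natCast]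
            exact List.drop_left' hlen1
          rw [e1, e2]
          obtain ⟨k, hk⟩ : ∃ k, slackOf s' = k + 1 := ⟨slackOf s' - 1, by omega⟩
          have hsle : k + 1 ≤ (settle s').length := by
            have h1 := slack_le s'
            rw [settle_length]; omega
          have hlj : (cs0.take j).length = j := by rw [List.length_take]; omega
          rw [hk]
          -- second rebuild: column[:last_block-1] + 'O' + column[last_block:]
          have hcast1 : ((j + 1 : Nat) : Int) + ((k + 1 : Nat) : Int) - 1 = ((j + k + 1 : Nat) : Int) := by
            push_cast; ring
          have hcast2 : ((j + 1 : Nat) : Int) + ((k + 1 : Nat) : Int) = ((j + k + 2 : Nat) : Int) := by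
            push_cast; ring
          rw [hcast1, hcast2, PySem.List.slice_to_natCast, PySem.List.slice_from_natCast]
          have e4 : (cs0.take j ++ '.' :: settle s').take (j + k + 1)
              = cs0.take j ++ '.' :: (settle s').take k := by
            rw [List.take_append, List.take_of_length_le (by omega), hlj,
                show j + k + 1 - j = k + 1 from by omega, List.take_succ_cons]
          have e5 : (cs0.take j ++ '.' :: settle s').drop (j + k + 2)
              = (settle s').drop (k + 1) := by
            rw [List.drop_append, List.drop_eq_nil_of_le (by omega), hlj,
                show j + k + 2 - j = k + 2 from by omega, List.nil_append, List.drop_succ_cons]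
          rw [e4, e5]
          have hstate : (cs0.take j ++ '.' :: (settle s').take k) ++ 'O' :: (settle s').drop (k + 1)
              = cs0.take j ++ settle (cs0.drop j) := by
            rw [hdrop, hO, settle_O, if_neg hz, hk, Nat.add_sub_cancel,
                List.set_eq_take_cons_drop _ (by omega : k < (settle s').length)]
            simp
          have hlb : ((j + k + 1 : Nat) : Int) = (j : Int) + (slackOf (cs0.drop j) : Int) := by
            rw [hsO, hk]; push_cast; ring
          rw [hstate, hlb]
          exact ih (by omega)
      · rw [if_neg hO]
        have hstate : cs0.take j ++ settle (cs0.drop j) = cs0.take (j + 1) ++ settle s' := by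
          rw [hdrop, settle_other _ hO, htake, List.append_assoc, List.singleton_append]
        have hslack : slackOf (cs0.drop j) = slackOf s' + 1 := by
          rw [hdrop, slack_other _ hw hO]
        have := ih (by omega)
        rw [hstate, hslack] at this
        have harith : ((j + 1 : Nat) : Int) + (slackOf s' : Int) = (j : Int) + ((slackOf s' + 1 : Nat) : Int) := by
          push_cast; ring
        rw [harith]
        exact this

-- ===== VERDICT (by name: the statement is the Claim_ definition above) =====
theorem update_south_spec : Claim_equal_update_south := by
  intro column _
  unfold Spec_update_south update_south
  rw [alt_eq_settle]
  have h := goA_inv column.toList column.toList.length (le_refl _)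
  simp only [List.take_length, List.drop_length] at h
  have hs0 : settle [] = [] := by simp [settle]
  have hk0 : slackOf ([] : List Char) = 0 := by simp [slackOf]
  rw [hs0, hk0, List.append_nil] at h
  simp only [Nat.cast_zero, add_zero] at h
  rw [h]
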